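-- pv_equiv track=rewrite | github.com/955750/ISSKS-Azterketarako-Lagungarria | kriptoanalisia.py | nHizkikoHitzakLortu
-- ===== SOURCE A (Python) =====
-- import string
--
-- def nHizkikoHitzakLortu(n, mezua):
--     hitzZerrenda = []
--     kont = 0
--     unekoHitza = ""
--     for i in mezua:
--         if i == " " or i in string.punctuation:
--             if kont == n:
--                 hitzZerrenda.append(unekoHitza)
--             kont = 0
--             unekoHitza = ""
--         else:
--             unekoHitza = unekoHitza + i
--             kont = kont + 1
--     return hitzZerrenda
-- ===== SOURCE B (Python) =====
-- import string
--
-- # B: translate all punctuation to spaces, split the whole message on ' ' at once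
-- # (keeping empty tokens), and keep the tokens of exactly n letters.  Unlike A,
-- # B also returns the trailing word (A only records a word when a delimiter
-- # follows it, so it silently drops a final word not followed by punctuation).
-- def nHizkikoHitzakLortu(n, mezua):
--     table = str.maketrans(string.punctuation, ' ' * len(string.punctuation))
--     tokens = mezua.translate(table).split(' ')
--     return [w for w in tokens if len(w) == n]
-- ===== Notes on version B (the rewrite author's own statement) =====
-- stated objective: idiomatic
-- what changed: Instead of a char-by-char scan with a word accumulator and counter, B translates every punctuation char to a space, splits the whole message on ' ' at once (keeping empty tokens) and filters tokens by exact length n; translate/split run as C-level builtins, removing the per-character Python loop.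
-- intended difference: On inputs whose trailing character run after the last delimiter has exactly n characters (including the empty run when n=0), A drops that final word because it only records a word when a delimiter follows it, while B also returns it, which is what extracting the words of exactly n letters intends. — e.g. on nHizkikoHitzakLortu(2, "ab cd"): A returns ["ab"], B returns ["ab", "cd"]
import Mathlib
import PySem

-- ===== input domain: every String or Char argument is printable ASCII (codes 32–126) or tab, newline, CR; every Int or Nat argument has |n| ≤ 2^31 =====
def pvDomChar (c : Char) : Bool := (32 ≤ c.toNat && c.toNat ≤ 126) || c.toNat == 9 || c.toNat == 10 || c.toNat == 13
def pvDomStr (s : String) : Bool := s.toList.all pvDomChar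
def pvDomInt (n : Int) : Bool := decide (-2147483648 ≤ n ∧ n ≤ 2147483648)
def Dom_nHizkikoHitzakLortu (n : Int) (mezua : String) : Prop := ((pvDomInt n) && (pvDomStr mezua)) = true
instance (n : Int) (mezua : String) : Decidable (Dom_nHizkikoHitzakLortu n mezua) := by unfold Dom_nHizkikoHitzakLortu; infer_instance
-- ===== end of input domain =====

-- B replaces A's char-by-char accumulator scan by translate-punctuation-to-space, one split on ' ', and a length filter
-- (idiomatic); intended difference: B also returns the trailing word, which A silently drops (see D_ below).


-- string.punctuation, verbatim
def pvPunct : List Char := "!\"#$%&'()*+,-./:;<=>?@[\\]^_`{|}~".toList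

-- delimiter test shared by both ports (A's `i == " " or i in string.punctuation`)
def pvIsDelim (c : Char) : Bool := c == ' ' || pvPunct.contains c

-- ===== PORT A =====
-- loop body of A; state = (hitzZerrenda, kont, unekoHitza) (unekoHitza carried as its char list)
def pvStepA (n : Int) (st : List String × Int × List Char) (i : Char) : List String × Int × List Char :=
  if pvIsDelim i then
    ((if st.2.1 == n then st.1 ++ [String.ofList st.2.2] else st.1), 0, [])
  else
    (st.1, st.2.1 + 1, st.2.2 ++ [i])

def nHizkikoHitzakLortu (n : Int) (mezua : String) : List String :=
  (mezua.toList.foldl (pvStepA n) ([], 0, [])).1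

-- ===== PORT B =====
-- Source B's mezua.translate(table): punctuation → ' '
def pvTr (c : Char) : Char := if pvPunct.contains c then ' ' else c

-- Source B's str.split(' '): split on the single char ' ', keeping empty tokens (exact)
def pvSplitSp : List Char → List (List Char)
  | [] => [[]]
  | c :: rest =>
    if c == ' ' then [] :: pvSplitSp rest
    else match pvSplitSp rest with
      | [] => [[c]]
      | t :: ts => (c :: t) :: ts

def nHizkikoHitzakLortu_alt (n : Int) (mezua : String) : List String :=
  ((pvSplitSp (mezua.toList.map pvTr)).map (fun t => String.ofList t)).filter
    (fun w => ((w.toList.length : Int) == n))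

-- ===== PRECONDITION & SPEC =====
-- On inputs whose trailing character run after the last delimiter has exactly n characters (including the
-- empty run when n = 0), A drops that final word (it only records a word when a delimiter follows it),
-- while B also returns it, which is what extracting the words of exactly n letters intends.
def D_nHizkikoHitzakLortu (n : Int) (mezua : String) : Prop :=
  ((mezua.toList.reverse.takeWhile (fun c => !pvIsDelim c)).length : Int) = n
instance (n : Int) (mezua : String) : Decidable (D_nHizkikoHitzakLortu n mezua) := by
  unfold D_nHizkikoHitzakLortu; infer_instance

def Spec_nHizkikoHitzakLortu (n : Int) (mezua : String) (out : List String) : Prop :=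
  ¬ D_nHizkikoHitzakLortu n mezua → out = nHizkikoHitzakLortu_alt n mezua
instance (n : Int) (mezua : String) (out : List String) : Decidable (Spec_nHizkikoHitzakLortu n mezua out) := by
  unfold Spec_nHizkikoHitzakLortu; infer_instance

def pvDiffWitness_nHizkikoHitzakLortu : Int × String := (2, "ab cd")
def pvDiffWitnessOut_nHizkikoHitzakLortu : (List String) × (List String) := (["ab"], ["ab", "cd"])

-- ===== CLAIM (what is proved, stated in full; the proofs are below) =====
def Claim_unchanged_nHizkikoHitzakLortu : Prop := ∀ (n : Int) (mezua : String), Dom_nHizkikoHitzakLortu n mezua → Spec_nHizkikoHitzakLortu n mezua (nHizkikoHitzakLortu n mezua)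
def Claim_changed_nHizkikoHitzakLortu : Prop := Dom_nHizkikoHitzakLortu (pvDiffWitness_nHizkikoHitzakLortu.1) (pvDiffWitness_nHizkikoHitzakLortu.2) ∧ D_nHizkikoHitzakLortu (pvDiffWitness_nHizkikoHitzakLortu.1) (pvDiffWitness_nHizkikoHitzakLortu.2) ∧ nHizkikoHitzakLortu (pvDiffWitness_nHizkikoHitzakLortu.1) (pvDiffWitness_nHizkikoHitzakLortu.2) = pvDiffWitnessOut_nHizkikoHitzakLortu.1 ∧ nHizkikoHitzakLortu_alt (pvDiffWitness_nHizkikoHitzakLortu.1) (pvDiffWitness_nHizkikoHitzakLortu.2) = pvDiffWitnessOut_nHizkikoHitzakLortu.2 ∧ pvDiffWitnessOut_nHizkikoHitzakLortu.1 ≠ pvDiffWitnessOut_nHizkikoHitzakLortu.2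
def Claim_exact_nHizkikoHitzakLortu : Prop := ∀ (n : Int) (mezua : String), Dom_nHizkikoHitzakLortu n mezua → D_nHizkikoHitzakLortu n mezua → nHizkikoHitzakLortu n mezua ≠ nHizkikoHitzakLortu_alt n mezua

-- ===== LEMMAS AND PROOFS =====

-- proof-side splitter directly on the delimiter predicate
def pvSplitD : List Char → List (List Char)
  | [] => [[]]
  | c :: rest =>
    if pvIsDelim c then [] :: pvSplitD rest
    else match pvSplitD rest with
      | [] => [[c]]
      | t :: ts => (c :: t) :: ts

lemma pvSplitD_ne_nil (cs : List Char) : pvSplitD cs ≠ [] := by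
  cases cs with
  | nil => simp [pvSplitD]
  | cons c rest =>
    simp only [pvSplitD]
    split
    · simp
    · cases h : pvSplitD rest <;> simp

lemma pvTr_delim {c : Char} (h : pvIsDelim c = true) : pvTr c = ' ' := by
  unfold pvIsDelim at h
  simp only [Bool.or_eq_true, beq_iff_eq] at h
  rcases h with h | h
  · subst h; unfold pvTr; split <;> rfl
  · have hc : pvPunct.contains c = true := by simpa using h
    unfold pvTr; rw [if_pos hc]

lemma pvTr_not_delim {c : Char} (h : pvIsDelim c = false) : pvTr c = c ∧ (c == ' ') = false := by
  have h' : (c == ' ') = false ∧ pvPunct.contains c = false := by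
    unfold pvIsDelim at h
    exact Bool.or_eq_false_iff.mp h
  refine ⟨?_, h'.1⟩
  unfold pvTr
  rw [if_neg (by rw [h'.2]; simp)]

lemma pvSplit_map (cs : List Char) : pvSplitSp (cs.map pvTr) = pvSplitD cs := by
  induction cs with
  | nil => rfl
  | cons c rest ih =>
    simp only [List.map_cons, pvSplitSp, pvSplitD]
    by_cases h : pvIsDelim c = true
    · rw [pvTr_delim h]
      simp [h, ih]
    · have h' := pvTr_not_delim (by simpa using h)
      rw [h'.1, h'.2]
      simp only [h, Bool.false_eq_true, if_false]
      rw [ih]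

-- the splitter with a partially built first token prepended
def pvSplitPre (cur cs : List Char) : List (List Char) :=
  match pvSplitD cs with
  | [] => [cur]
  | t :: ts => (cur ++ t) :: ts

lemma pvSplitPre_delim {c : Char} (h : pvIsDelim c = true) (cur rest : List Char) :
    pvSplitPre cur (c :: rest) = cur :: pvSplitD rest := by
  unfold pvSplitPre
  simp only [pvSplitD, h, if_true]
  simp

lemma pvSplitPre_not_delim {c : Char} (h : pvIsDelim c = false) (cur rest : List Char) :
    pvSplitPre cur (c :: rest) = pvSplitPre (cur ++ [c]) rest := by
  unfold pvSplitPre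
  simp only [pvSplitD, h, Bool.false_eq_true, if_false]
  cases hr : pvSplitD rest with
  | nil => simp
  | cons t ts => simp

lemma pvSplitPre_nil_eq (cs : List Char) : pvSplitPre [] cs = pvSplitD cs := by
  unfold pvSplitPre
  cases h : pvSplitD cs with
  | nil => exact absurd h (pvSplitD_ne_nil cs)
  | cons t ts => simp

-- characterisation of A's fold
lemma foldA (n : Int) (cs : List Char) : ∀ (acc : List String) (cur : List Char),
    (cs.foldl (pvStepA n) (acc, (cur.length : Int), cur)).1
      = acc ++ ((pvSplitPre cur cs).dropLast.filter (fun t => ((t.length : Int) == n))).map String.ofList := by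
  induction cs with
  | nil =>
    intro acc cur
    simp [pvSplitPre, pvSplitD]
  | cons c rest ih =>
    intro acc cur
    by_cases h : pvIsDelim c = true
    · rw [List.foldl_cons]
      have hstep : pvStepA n (acc, (cur.length : Int), cur) c
          = ((if ((cur.length : Int) == n) then acc ++ [String.ofList cur] else acc),
             ((([] : List Char).length : Nat) : Int), ([] : List Char)) := by
        simp [pvStepA, h]
      rw [hstep, ih, pvSplitPre_nil_eq, pvSplitPre_delim h]
      cases hr : pvSplitD rest with
      | nil => exact absurd hr (pvSplitD_ne_nil rest)
      | cons t ts =>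
        simp only [List.dropLast_cons₂, List.filter_cons]
        by_cases hc : ((cur.length : Int) == n) = true
        · simp [hc]
        · simp [hc]
    · rw [List.foldl_cons]
      have h' : pvIsDelim c = false := by simpa using h
      have hstep : pvStepA n (acc, (cur.length : Int), cur) c
          = (acc, (((cur ++ [c]).length : Nat) : Int), cur ++ [c]) := by
        unfold pvStepA
        rw [if_neg (by simp [h'])]
        simp
      rw [hstep, ih, pvSplitPre_not_delim h']

-- the last token, as a forward fold
lemma lastTok (cs : List Char) : ∀ (cur : List Char),
    (pvSplitPre cur cs).getLast?
      = some (cs.foldl (fun acc c => if pvIsDelim c then [] else acc ++ [c]) cur) := by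
  induction cs with
  | nil =>
    intro cur
    simp [pvSplitPre, pvSplitD]
  | cons c rest ih =>
    intro cur
    by_cases h : pvIsDelim c = true
    · rw [pvSplitPre_delim h]
      rw [List.foldl_cons]
      simp only [h, if_true]
      rw [← pvSplitPre_nil_eq, ← ih []]
      cases hr : pvSplitPre [] rest with
      | nil =>
        rw [pvSplitPre_nil_eq] at hr
        exact absurd hr (pvSplitD_ne_nil rest)
      | cons t ts => rw [List.getLast?_cons_cons]
    · have h' : pvIsDelim c = false := by simpa using h
      rw [pvSplitPre_not_delim h', List.foldl_cons]
      simp only [h', Bool.false_eq_true, if_false]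
      exact ih (cur ++ [c])

lemma tw_app (p : Char → Bool) (c : Char) (l : List Char) :
    (l ++ [c]).takeWhile p = if l.all p then l ++ [c].takeWhile p else l.takeWhile p := by
  induction l with
  | nil => simp
  | cons a l ih =>
    by_cases ha : p a = true
    · simp only [List.cons_append, List.takeWhile_cons, ha, if_true, List.all_cons, Bool.true_and, ih]
      split <;> simp
    · have ha' : p a = false := by simpa using ha
      simp [List.takeWhile_cons, ha', List.all_cons]

lemma takeWhile_of_all {p : Char → Bool} {l : List Char} (h : l.all p = true) :
    l.takeWhile p = l := by
  induction l with
  | nil => rfl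
  | cons a l ih =>
    simp only [List.all_cons, Bool.and_eq_true] at h
    simp [List.takeWhile_cons, h.1, ih h.2]

lemma foldLS (cs : List Char) : ∀ (cur : List Char),
    cs.foldl (fun acc c => if pvIsDelim c then [] else acc ++ [c]) cur
      = if cs.all (fun c => !pvIsDelim c) then cur ++ cs
        else (cs.reverse.takeWhile (fun c => !pvIsDelim c)).reverse := by
  induction cs with
  | nil => intro cur; simp
  | cons c rest ih =>
    intro cur
    by_cases h : pvIsDelim c = true
    · rw [List.foldl_cons]
      simp only [h, if_true, ih []]
      have hall : (c :: rest).all (fun c => !pvIsDelim c) = false := by simp [h]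
      rw [hall]
      simp only [Bool.false_eq_true, if_false, List.reverse_cons]
      rw [tw_app _ c rest.reverse]
      have : List.takeWhile (fun c => !pvIsDelim c) [c] = [] := by
        simp [List.takeWhile_cons, h]
      rw [this]
      by_cases hrest : rest.all (fun c => !pvIsDelim c) = true
      · have : rest.reverse.all (fun c => !pvIsDelim c) = true := by simpa using hrest
        rw [hrest, this]
        simp [takeWhile_of_all this]
      · have h2 : rest.reverse.all (fun c => !pvIsDelim c) = false := by
          simp only [List.all_reverse]
          simpa using hrest
        have h1 : rest.all (fun c => !pvIsDelim c) = false := by simpa using hrest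
        rw [h1, h2]
        simp
    · have h' : pvIsDelim c = false := by simpa using h
      rw [List.foldl_cons]
      simp only [h', Bool.false_eq_true, if_false, ih (cur ++ [c])]
      have hall : (c :: rest).all (fun c => !pvIsDelim c) = rest.all (fun c => !pvIsDelim c) := by
        simp [h']
      rw [hall]
      by_cases hrest : rest.all (fun c => !pvIsDelim c) = true
      · simp [hrest]
      · have h1 : rest.all (fun c => !pvIsDelim c) = false := by simpa using hrest
        have h2 : rest.reverse.all (fun c => !pvIsDelim c) = false := by
          simp only [List.all_reverse]; exact h1
        rw [h1]
        simp only [Bool.false_eq_true, if_false, List.reverse_cons]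
        rw [tw_app _ c rest.reverse, h2]
        simp

-- the last token is exactly the trailing non-delimiter run
lemma lastTok_tw (cs : List Char) :
    (pvSplitD cs).getLast? = some ((cs.reverse.takeWhile (fun c => !pvIsDelim c)).reverse) := by
  rw [← pvSplitPre_nil_eq, lastTok cs [], foldLS cs []]
  by_cases h : cs.all (fun c => !pvIsDelim c) = true
  · have h2 : cs.reverse.all (fun c => !pvIsDelim c) = true := by simpa using h
    rw [h]
    simp [takeWhile_of_all h2]
  · have h1 : cs.all (fun c => !pvIsDelim c) = false := by simpa using h
    rw [h1]
    simp

-- A's result and B's result, through the common splitter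
lemma A_eq (n : Int) (mezua : String) :
    nHizkikoHitzakLortu n mezua
      = ((pvSplitD mezua.toList).dropLast.filter (fun t => ((t.length : Int) == n))).map String.ofList := by
  unfold nHizkikoHitzakLortu
  have := foldA n mezua.toList [] []
  simpa [pvSplitPre_nil_eq] using this

lemma B_eq (n : Int) (mezua : String) :
    nHizkikoHitzakLortu_alt n mezua
      = ((pvSplitD mezua.toList).filter (fun t => ((t.length : Int) == n))).map String.ofList := by
  unfold nHizkikoHitzakLortu_alt
  rw [pvSplit_map, List.filter_map]
  congr 1
  apply List.filter_congr
  intro t _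
  simp

lemma split_decomp (n : Int) (mezua : String) :
    ((pvSplitD mezua.toList).filter (fun t => ((t.length : Int) == n)))
      = ((pvSplitD mezua.toList).dropLast.filter (fun t => ((t.length : Int) == n)))
        ++ (if (((mezua.toList.reverse.takeWhile (fun c => !pvIsDelim c)).length : Int) == n)
            then [(mezua.toList.reverse.takeWhile (fun c => !pvIsDelim c)).reverse] else []) := by
  set T := pvSplitD mezua.toList with hT
  have hne : T ≠ [] := pvSplitD_ne_nil _
  have hlast : T.getLast hne = (mezua.toList.reverse.takeWhile (fun c => !pvIsDelim c)).reverse := by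
    have := lastTok_tw mezua.toList
    rw [← hT, List.getLast?_eq_some_getLast hne] at this
    exact Option.some.inj this
  conv_lhs => rw [← List.dropLast_append_getLast hne]
  rw [List.filter_append, hlast]
  congr 1
  by_cases hn : (((mezua.toList.reverse.takeWhile (fun c => !pvIsDelim c)).length : Int) == n) = true
  · simp [List.filter_cons, hn]
  · simp [List.filter_cons, hn, Bool.eq_false_iff.mpr hn]

-- ===== VERDICT (by name: the statement is the Claim_ definition above) =====
theorem nHizkikoHitzakLortu_spec : Claim_unchanged_nHizkikoHitzakLortu := by
  intro n mezua _ hD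
  rw [A_eq, B_eq, split_decomp]
  have : ((((mezua.toList.reverse.takeWhile (fun c => !pvIsDelim c)).length : Nat) : Int) == n) = false := by
    simpa [D_nHizkikoHitzakLortu] using hD
  rw [this]
  simp

theorem nHizkikoHitzakLortu_changed : Claim_changed_nHizkikoHitzakLortu := by
  unfold Claim_changed_nHizkikoHitzakLortu; decide

theorem nHizkikoHitzakLortu_tight : Claim_exact_nHizkikoHitzakLortu := by
  intro n mezua _ hD heq
  rw [A_eq, B_eq, split_decomp] at heq
  have hb : ((((mezua.toList.reverse.takeWhile (fun c => !pvIsDelim c)).length : Nat) : Int) == n) = true := by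
    simpa [D_nHizkikoHitzakLortu] using hD
  rw [hb] at heq
  simp at heq
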